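-- pv_equiv track=rewrite | github.com/ssmythe/opening_arena | opening_arena_working_005.py | format_san_sequence
-- ===== SOURCE A (Python) =====
-- def format_san_sequence(san_seq):
--     """
--     Given a list of SAN half-moves, produce a single string with move numbers.
--     For example, if san_seq = ['e4', 'e5', 'Nf3', 'Nc6'] then return:
--       "1.e4 e5 2.Nf3 Nc6"
--     (No space after the move number.)
--     """
--     moves = []
--     move_num = 1
--     i = 0
--     while i < len(san_seq):
--         if i + 1 < len(san_seq):
--             moves.append(f"{move_num}.{san_seq[i]} {san_seq[i+1]}")
--             i += 2
--         else:
--             moves.append(f"{move_num}.{san_seq[i]}")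
--             i += 1
--         move_num += 1
--     return " ".join(moves)
-- ===== SOURCE B (Python) =====
-- def format_san_sequence(san_seq):
--     """Single pass over half-moves: tag each element by parity instead of
--     stepping two at a time; even indices get a move-number prefix."""
--     tokens = [
--         san if i % 2 else f"{i // 2 + 1}.{san}"
--         for i, san in enumerate(san_seq)
--     ]
--     return " ".join(tokens)
-- ===== Notes on version B (the rewrite author's own statement) =====
-- stated objective: simpler
-- what changed: Replaces the explicit while-loop that steps two at a time and merges each white/black pair (with a special case for a trailing odd move) by a single enumerate-based comprehension that tags every half-move by index parity and joins the flat token list.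
import Mathlib
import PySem

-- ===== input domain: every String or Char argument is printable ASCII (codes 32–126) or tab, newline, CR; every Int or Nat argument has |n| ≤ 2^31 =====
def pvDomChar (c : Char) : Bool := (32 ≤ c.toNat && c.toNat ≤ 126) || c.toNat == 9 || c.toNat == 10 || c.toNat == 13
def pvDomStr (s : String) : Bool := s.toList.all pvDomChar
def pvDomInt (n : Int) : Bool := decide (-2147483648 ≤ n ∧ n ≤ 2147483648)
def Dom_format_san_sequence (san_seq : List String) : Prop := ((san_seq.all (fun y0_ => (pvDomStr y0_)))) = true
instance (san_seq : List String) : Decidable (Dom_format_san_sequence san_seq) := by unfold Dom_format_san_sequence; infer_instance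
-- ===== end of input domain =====

-- B replaces A's two-at-a-time while loop (pair merging + trailing-move special case)
-- by a single parity-tagged pass over enumerate; objective: simpler decomposition.

set_option maxRecDepth 4000


-- ===== PORT A =====
-- while loop over index i: consuming the remaining list two (or one) at a time,
-- carrying move_num; appended strings become the result list, joined at the end.
def fssGoA : List String → Int → List String
  | [], _ => []
  | [x], n => [PySem.Int.toStr n ++ "." ++ x]
  | x :: y :: rest, n =>
      (PySem.Int.toStr n ++ "." ++ x ++ " " ++ y) :: fssGoA rest (n + 1)

def format_san_sequence (san_seq : List String) : String :=
  PySem.Str.join " " (fssGoA san_seq 1)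

-- ===== PORT B =====
def fssTokB (p : Int × String) : String :=
  if PySem.Int.mod p.1 2 = 0 then
    PySem.Int.toStr (PySem.Int.floordiv p.1 2 + 1) ++ "." ++ p.2
  else p.2

def format_san_sequence_alt (san_seq : List String) : String :=
  PySem.Str.join " " ((PySem.List.enumerate san_seq 0).map fssTokB)

-- ===== PRECONDITION & SPEC =====
def Spec_format_san_sequence (san_seq : List String) (out : String) : Prop := out = format_san_sequence_alt san_seq
instance (san_seq : List String) (out : String) : Decidable (Spec_format_san_sequence san_seq out) := by unfold Spec_format_san_sequence; infer_instance

-- ===== CLAIM (what is proved, stated in full; the proofs are below) =====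
def Claim_equal_format_san_sequence : Prop := ∀ (san_seq : List String), Dom_format_san_sequence san_seq → Spec_format_san_sequence san_seq (format_san_sequence san_seq)

-- ===== LEMMAS AND PROOFS =====

theorem join_merge (sep p q : List Char) (rest : List (List Char)) :
    PySem.Chars.join sep ((p ++ sep ++ q) :: rest) = PySem.Chars.join sep (p :: q :: rest) := by
  cases rest with
  | nil => simp [PySem.Chars.join_cons_cons, PySem.Chars.join_singleton]
  | cons r rs =>
      rw [PySem.Chars.join_cons_cons, PySem.Chars.join_cons_cons, PySem.Chars.join_cons_cons]
      simp [List.append_assoc]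

theorem join_congr_tail (sep a : List Char) (L1 L2 : List (List Char))
    (hnil : L1 = [] ↔ L2 = [])
    (h : PySem.Chars.join sep L1 = PySem.Chars.join sep L2) :
    PySem.Chars.join sep (a :: L1) = PySem.Chars.join sep (a :: L2) := by
  cases L1 with
  | nil => cases L2 with
    | nil => rfl
    | cons b bs => simp at hnil
  | cons b bs => cases L2 with
    | nil => simp at hnil
    | cons c cs =>
        rw [PySem.Chars.join_cons_cons, PySem.Chars.join_cons_cons, h]

theorem fss_main (s : List String) (k : Nat) :
    PySem.Chars.join " ".toList ((fssGoA s ((k : Int) + 1)).map String.toList)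
      = PySem.Chars.join " ".toList
          ((PySem.List.enumerate s (2 * (k : Int))).map (fun p => (fssTokB p).toList)) := by
  match s with
  | [] => simp [fssGoA, PySem.List.enumerate_nil]
  | [x] =>
      simp [fssGoA, PySem.List.enumerate_cons, PySem.List.enumerate_nil, fssTokB]
  | x :: y :: rest =>
      have ih := fss_main rest (k + 1)
      rw [PySem.List.enumerate_cons, PySem.List.enumerate_cons]
      simp only [List.map, fssGoA]
      have htokx : (fssTokB (2 * (k : Int), x)).toList
          = (PySem.Int.toStr ((k : Int) + 1) ++ "." ++ x).toList := by
        simp [fssTokB]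
      have htoky : (fssTokB (2 * (k : Int) + 1, y)).toList = y.toList := by
        simp [fssTokB]
      rw [htokx, htoky]
      have hmerge : (PySem.Int.toStr ((k : Int) + 1) ++ "." ++ x ++ " " ++ y).toList
          = ((PySem.Int.toStr ((k : Int) + 1) ++ "." ++ x).toList ++ " ".toList ++ y.toList) := by
        simp
      rw [hmerge, join_merge]
      refine join_congr_tail _ _ _ _ (by simp) (join_congr_tail _ _ _ _ ?_ ?_)
      · constructor
        · intro h
          have hr : rest = [] := by
            cases rest with
            | nil => rfl
            | cons z zs => cases zs <;> simp [fssGoA] at h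
          simp [hr, PySem.List.enumerate_nil]
        · intro h
          have hr : rest = [] := by
            cases rest with
            | nil => rfl
            | cons z zs => rw [PySem.List.enumerate_cons] at h; simp at h
          cases hr
          simp [fssGoA]
      · have hstart : (2 * (k : Int)) + 1 + 1 = 2 * ((k + 1 : Nat) : Int) := by push_cast; ring
        rw [hstart]
        have harg : ((k : Int) + 1 + 1) = (((k + 1 : Nat) : Int) + 1) := by push_cast; ring
        rw [harg]
        exact ih

-- ===== VERDICT (by name: the statement is the Claim_ definition above) =====
theorem format_san_sequence_spec : Claim_equal_format_san_sequence := by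
  intro s _
  unfold Spec_format_san_sequence format_san_sequence format_san_sequence_alt
  have h := fss_main s 0
  simp only [Nat.cast_zero, zero_add, mul_zero] at h
  apply String.toList_inj.mp ?_
  rw [PySem.Str.toList_join, PySem.Str.toList_join]
  convert h using 2
  simp [Function.comp]
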